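-- pv_equiv track=rewrite | github.com/a-sokolova-dev/tira | vko11/fliptwo.py | solve
-- ===== SOURCE A (Python) =====
-- import collections
--
-- def solve(n, k):
--     queue = collections.deque(range(1, n+1))
--
--     for _ in range(k):
--         el1 = queue.popleft()
--         el2 = queue.popleft()
--
--         queue.append(el2)
--         queue.append(el1)
--
--     return queue.popleft()
-- ===== SOURCE B (Python) =====
-- def solve(n, k):
--     # Front of the queue 1..n after k "move first two swapped to the back" operations,
--     # by closed-form cycle of the front position (O(1) instead of O(n+k)).
--     if k <= 0:
--         return 1
--     if n % 2 == 0: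
--         r = k % n
--         half = n // 2
--         return 2 * r + 1 if r < half else 2 * (r - half) + 2
--     else:
--         r = k % ((n + 1) // 2)
--         return 2 * r + 1
-- ===== Notes on version B (the rewrite author's own statement) =====
-- stated objective: faster
-- what changed: B replaces A's deque simulation of k swap-to-back operations by the closed-form cycle of the front position (the front index follows a fixed permutation cycle of length n for even n and (n+1)/2 for odd n), computing the answer with one modulo instead of k queue operations.
import Mathlib
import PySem

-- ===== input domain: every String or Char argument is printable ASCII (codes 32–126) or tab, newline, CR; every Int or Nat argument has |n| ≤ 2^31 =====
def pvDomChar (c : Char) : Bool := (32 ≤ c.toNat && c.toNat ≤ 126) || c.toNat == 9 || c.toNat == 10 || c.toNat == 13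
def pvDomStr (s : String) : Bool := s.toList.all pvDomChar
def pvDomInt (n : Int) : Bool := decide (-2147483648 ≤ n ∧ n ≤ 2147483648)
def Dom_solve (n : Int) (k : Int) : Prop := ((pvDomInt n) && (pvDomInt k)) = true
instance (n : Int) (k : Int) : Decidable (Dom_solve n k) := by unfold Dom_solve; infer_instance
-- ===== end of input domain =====

-- B replaces A's O(n+k) deque simulation by the closed-form cycle of the front position (O(1)).

-- ===== PORT A =====
-- one loop iteration: el1 = popleft(); el2 = popleft(); append(el2); append(el1)
-- (none = popleft from a queue with fewer than two elements raises IndexError)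
def stepA : List Int → Option (List Int)
  | a :: b :: rest => some (rest ++ [b, a])
  | _ => none

def loopA : Nat → List Int → Option (List Int)
  | 0, q => some q
  | m + 1, q =>
    match stepA q with
    | some q' => loopA m q'
    | none => none

def solve (n : Int) (k : Int) : Int :=
  match loopA k.toNat (PySem.List.pyRange 1 (n + 1) 1) with
  | some (x :: _) => x
  | _ => 0  -- A raises IndexError here (queue too short); excluded by Pre_solve

-- ===== PORT B =====
def solve_alt (n : Int) (k : Int) : Int :=
  if k ≤ 0 then 1
  else if PySem.Int.mod n 2 = 0 then
    let r := PySem.Int.mod k n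
    let half := PySem.Int.floordiv n 2
    if r < half then 2 * r + 1 else 2 * (r - half) + 2
  else
    let r := PySem.Int.mod k (PySem.Int.floordiv (n + 1) 2)
    2 * r + 1

-- ===== PRECONDITION & SPEC =====
-- Pre_solve admits exactly the inputs on which A returns: A raises IndexError when n < 1
-- (empty queue at the final popleft) or when k > 0 and n < 2 (popping two from a short queue).
def Pre_solve (n : Int) (k : Int) : Prop := 1 ≤ n ∧ (k ≤ 0 ∨ 2 ≤ n)
instance (n : Int) (k : Int) : Decidable (Pre_solve n k) := by unfold Pre_solve; infer_instance

def pvWitness_solve : Int × Int := (3, 4)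

def Spec_solve (n : Int) (k : Int) (out : Int) : Prop := out = solve_alt n k
instance (n : Int) (k : Int) (out : Int) : Decidable (Spec_solve n k out) := by unfold Spec_solve; infer_instance

-- ===== CLAIM (what is proved, stated in full; the proofs are below) =====
def Claim_equal_solve : Prop := ∀ (n : Int) (k : Int), Dom_solve n k → Pre_solve n k → Spec_solve n k (solve n k)

-- ===== LEMMAS AND PROOFS =====

-- One step sends the element at position hIdx L j to position j (L = queue length).
def hIdx (L j : Nat) : Nat := if j + 2 < L then j + 2 else L - 1 - j

def iterIdx (L : Nat) : Nat → Nat → Nat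
  | 0, j => j
  | m + 1, j => hIdx L (iterIdx L m j)

-- closed form of iterIdx L m 0
def F (L m : Nat) : Nat :=
  if L % 2 = 0 then
    if m % L < L / 2 then 2 * (m % L) else 2 * (m % L - L / 2) + 1
  else
    2 * (m % (L / 2 + 1))

lemma hIdx_lt {L j : Nat} (_hL : 1 ≤ L) (hj : j < L) : hIdx L j < L := by
  unfold hIdx; split_ifs <;> omega

lemma iterIdx_lt {L j : Nat} (hL : 1 ≤ L) (hj : j < L) (m : Nat) : iterIdx L m j < L := by
  induction m with
  | zero => exact hj
  | succ m ih => exact hIdx_lt hL ih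

lemma succ_mod (m P : Nat) (hP : 0 < P) :
    (m + 1) % P = if m % P + 1 = P then 0 else m % P + 1 := by
  have h1 : (m + 1) % P = (m % P + 1 % P) % P := Nat.add_mod m 1 P
  rcases Nat.lt_or_ge 1 P with hP2 | hP2
  · have h2 : 1 % P = 1 := Nat.mod_eq_of_lt hP2
    have hlt : m % P < P := Nat.mod_lt _ hP
    rw [h1, h2]
    split_ifs with h
    · rw [h, Nat.mod_self]
    · exact Nat.mod_eq_of_lt (by omega)
  · have hP1 : P = 1 := by omega
    subst hP1
    simp [Nat.mod_one]

lemma F_zero {L : Nat} (hL : 2 ≤ L) : F L 0 = 0 := by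
  unfold F
  simp only [Nat.zero_mod]
  split_ifs <;> omega

lemma F_step {L : Nat} (hL : 2 ≤ L) (m : Nat) : F L (m + 1) = hIdx L (F L m) := by
  unfold F hIdx
  by_cases hpar : L % 2 = 0
  · have hP : 0 < L := by omega
    have hs := succ_mod m L hP
    have hlt : m % L < L := Nat.mod_lt _ hP
    simp only [hpar, if_true, hs]
    set r := m % L with hr
    clear_value r
    split_ifs <;> omega
  · have hP : 0 < L / 2 + 1 := by omega
    have hs := succ_mod m (L / 2 + 1) hP
    have hlt : m % (L / 2 + 1) < L / 2 + 1 := Nat.mod_lt _ hP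
    simp only [hpar, if_false, hs]
    set r := m % (L / 2 + 1) with hr
    clear_value r
    split_ifs <;> omega

lemma iterIdx_zero_eq_F {L : Nat} (hL : 2 ≤ L) (m : Nat) : iterIdx L m 0 = F L m := by
  induction m with
  | zero => exact (F_zero hL).symm
  | succ m ih => rw [iterIdx, ih, F_step hL]

-- one step permutes positions by hIdx
lemma step_getD (a b : Int) (rest : List Int) (j : Nat) (hj : j < rest.length + 2) :
    (rest ++ [b, a]).getD j 0 = (a :: b :: rest).getD (hIdx (rest.length + 2) j) 0 := by
  unfold hIdx
  split_ifs with h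
  · have hj' : j < rest.length := by omega
    rw [List.getD_append _ _ _ j hj']
    have : j + 2 = (j + 1) + 1 := by omega
    rw [this, List.getD_cons_succ, List.getD_cons_succ]
  · have : j = rest.length ∨ j = rest.length + 1 := by omega
    rcases this with h1 | h1 <;> subst h1
    · rw [List.getD_append_right _ _ _ _ (le_refl _)]
      simp
    · rw [List.getD_append_right _ _ _ _ (by omega)]
      have h2 : rest.length + 1 - rest.length = 1 := by omega
      rw [h2]
      have h3 : rest.length + 2 - 1 - (rest.length + 1) = 0 := by omega
      rw [h3]
      simp

lemma loopA_spec (m : Nat) : ∀ (q : List Int), 2 ≤ q.length →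
    ∃ q', loopA m q = some q' ∧ q'.length = q.length ∧
      ∀ j, j < q.length → q'.getD j 0 = q.getD (iterIdx q.length m j) 0 := by
  induction m with
  | zero =>
    intro q hq
    exact ⟨q, rfl, rfl, fun j _ => rfl⟩
  | succ m ih =>
    intro q hq
    match q, hq with
    | a :: b :: rest, _ =>
      obtain ⟨q', h1, h2, h3⟩ := ih (rest ++ [b, a]) (by simp)
      have hlen : (rest ++ [b, a]).length = (a :: b :: rest).length := by simp
      refine ⟨q', ?_, by rw [h2, hlen], ?_⟩
      · simp only [loopA, stepA]
        exact h1
      · intro j hj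
        have hj' : j < (rest ++ [b, a]).length := by simp at hj ⊢; omega
        have := h3 j hj'
        rw [this]
        have hidx_lt : iterIdx (rest ++ [b, a]).length m j < rest.length + 2 := by
          have := iterIdx_lt (L := (rest ++ [b, a]).length) (by simp) hj' m
          simpa using this
        rw [step_getD a b rest _ hidx_lt]
        have hL : (rest ++ [b, a]).length = (a :: b :: rest).length := by simp
        simp only [hL]
        rfl

-- elements of the initial queue
lemma q0_getD (n : Int) (j : Nat) (hj : j < n.toNat) :
    (PySem.List.pyRange 1 (n + 1) 1).getD j 0 = 1 + (j : Int) := by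
  have hlen : (PySem.List.pyRange 1 (n + 1) 1).length = n.toNat := by
    rw [PySem.List.length_pyRange_one]
    omega
  have hj' : j < (PySem.List.pyRange 1 (n + 1) 1).length := by omega
  rw [List.getD_eq_getElem _ _ hj']
  exact PySem.List.getElem_pyRange_one 1 (n + 1) j hj'

lemma alt_closed_nat (L m : Nat) (hL : 2 ≤ L) (hm : 0 < m) :
    solve_alt (L : Int) (m : Int) = 1 + (F L m : Int) := by
  have e1 : PySem.Int.mod (L : Int) 2 = ((L % 2 : Nat) : Int) := by
    exact_mod_cast PySem.Int.mod_natCast L 2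
  have e2 : PySem.Int.floordiv (L : Int) 2 = ((L / 2 : Nat) : Int) := by
    exact_mod_cast PySem.Int.floordiv_natCast L 2
  have e3 : PySem.Int.mod (m : Int) (L : Int) = ((m % L : Nat) : Int) := PySem.Int.mod_natCast m L
  have e4 : PySem.Int.floordiv ((L : Int) + 1) 2 = (((L + 1) / 2 : Nat) : Int) := by
    exact_mod_cast PySem.Int.floordiv_natCast (L + 1) 2
  have e5 : PySem.Int.mod (m : Int) ((((L + 1) / 2 : Nat) : Nat) : Int)
      = ((m % ((L + 1) / 2) : Nat) : Int) := PySem.Int.mod_natCast m ((L + 1) / 2)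
  rw [solve_alt, if_neg (by omega)]
  rw [e1, e3, e2, e4, e5]
  unfold F
  by_cases hpar : L % 2 = 0
  · have hlt : m % L < L := Nat.mod_lt _ (by omega)
    rw [if_pos (by exact_mod_cast hpar), if_pos hpar]
    simp only [Nat.cast_lt]
    generalize m % L = r at hlt ⊢
    split_ifs with h <;> push_cast [*] <;> omega
  · have hc : ¬ ((L % 2 : Nat) : Int) = 0 := by
      intro h; exact hpar (by exact_mod_cast h)
    rw [if_neg hc, if_neg hpar]
    have hdiv : (L + 1) / 2 = L / 2 + 1 := by omega
    simp only [hdiv]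
    push_cast
    omega

-- ===== VERDICT (by name: the statement is the Claim_ definition above) =====
theorem solve_spec : Claim_equal_solve := by
  intro n k _ hPre
  unfold Spec_solve
  obtain ⟨hn1, hk2⟩ := hPre
  by_cases hk : k ≤ 0
  · -- zero iterations: the queue is untouched and its front is 1
    have hk0 : k.toNat = 0 := by omega
    have hcons : PySem.List.pyRange 1 (n + 1) 1 = 1 :: PySem.List.pyRange 2 (n + 1) 1 := by
      have := PySem.List.pyRange_one_cons (a := 1) (b := n + 1) (by omega)
      simpa using this
    rw [solve, hk0, hcons]
    simp only [loopA]
    rw [solve_alt, if_pos hk]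
  · have hk' : 0 < k := by omega
    have hn2 : 2 ≤ n := hk2.resolve_left hk
    set L := n.toNat with hLdef
    have hL2 : 2 ≤ L := by omega
    have hqlen : (PySem.List.pyRange 1 (n + 1) 1).length = L := by
      rw [PySem.List.length_pyRange_one]; omega
    obtain ⟨q', h1, h2, h3⟩ := loopA_spec k.toNat (PySem.List.pyRange 1 (n + 1) 1) (by omega)
    have hfront := h3 0 (by omega)
    have hidx0 : iterIdx (PySem.List.pyRange 1 (n + 1) 1).length k.toNat 0 = F L k.toNat := by
      rw [hqlen]; exact iterIdx_zero_eq_F hL2 k.toNat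
    rw [hidx0] at hfront
    have hFlt : F L k.toNat < L := by
      rw [← iterIdx_zero_eq_F hL2]
      exact iterIdx_lt (by omega) (by omega) k.toNat
    rw [q0_getD n _ (by omega)] at hfront
    have hn' : n = ((L : Nat) : Int) := by omega
    have hk'' : k = ((k.toNat : Nat) : Int) := by omega
    rcases q' with _ | ⟨x, t⟩
    · exfalso
      rw [hqlen] at h2
      simp at h2
      omega
    · rw [solve, h1]
      show x = solve_alt n k
      conv_rhs => rw [hn', hk'']
      rw [alt_closed_nat L k.toNat hL2 (by omega)]
      simpa using hfront
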